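-- pv_equiv track=rewrite | github.com/0spinboson/verenigingen | cleanup_temp/api_one_offs/test_mutation_range_migration.py | check_for_gaps
-- ===== SOURCE A (Python) =====
-- def check_for_gaps(numbers):
--     """Check if there are gaps in mutation numbers"""
--     if not numbers:
--         return False
--
--     sorted_nums = sorted(numbers)
--     for i in range(1, len(sorted_nums)):
--         if sorted_nums[i] - sorted_nums[i-1] > 1:
--             return True
--     return False
-- ===== SOURCE B (Python) =====
-- def check_for_gaps(numbers):
--     """Check if there are gaps in mutation numbers"""
--     if not numbers:
--         return False
--     s = set(numbers)
--     return max(s) - min(s) + 1 != len(s)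
-- ===== Notes on version B (the rewrite author's own statement) =====
-- stated objective: simpler
-- what changed: A sorts the list and scans adjacent differences for a gap; B builds the set of distinct values once and decides gap-existence by the counting identity max - min + 1 != number of distinct values, with no sort and no pairwise scan.
import Mathlib
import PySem

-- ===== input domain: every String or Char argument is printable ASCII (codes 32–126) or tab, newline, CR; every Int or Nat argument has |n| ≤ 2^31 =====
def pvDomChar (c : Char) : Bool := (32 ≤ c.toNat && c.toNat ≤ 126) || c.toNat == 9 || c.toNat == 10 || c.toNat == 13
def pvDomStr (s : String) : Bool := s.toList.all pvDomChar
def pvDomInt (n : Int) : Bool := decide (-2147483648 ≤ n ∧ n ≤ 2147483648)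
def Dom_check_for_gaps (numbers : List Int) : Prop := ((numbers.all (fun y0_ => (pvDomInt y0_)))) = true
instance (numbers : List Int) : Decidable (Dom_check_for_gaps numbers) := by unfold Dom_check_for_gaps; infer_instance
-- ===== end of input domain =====

-- B replaces A's "sort, then scan adjacent differences" by "build the distinct set once and
-- compare max - min + 1 with the distinct count" — a counting test instead of a sorted scan.

-- ===== PORT A =====
-- the 'for i in range(1, len(sorted_nums))' loop with its early 'return True'
def gapLoopA (L : List Int) : List Int → Bool
  | [] => false
  | i :: rest =>
    if PySem.List.pyGetD L i 0 - PySem.List.pyGetD L (i - 1) 0 > 1 then true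
    else gapLoopA L rest

def check_for_gaps (numbers : List Int) : Bool :=
  if numbers = [] then false
  else
    let sorted_nums := PySem.List.sorted numbers (fun x => x)
    gapLoopA sorted_nums (PySem.List.pyRange 1 (PySem.List.len sorted_nums))

-- ===== PORT B =====
def check_for_gaps_alt (numbers : List Int) : Bool :=
  if numbers = [] then false
  else
    let s := PySem.Set.ofList numbers
    match PySem.List.max? s (fun x => x), PySem.List.min? s (fun x => x) with
    | some mx, some mn => decide (mx - mn + 1 ≠ PySem.Set.len s)
    | _, _ => false   -- unreachable: s is nonempty when numbers is

-- ===== PRECONDITION & SPEC =====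
def Spec_check_for_gaps (numbers : List Int) (out : Bool) : Prop := out = check_for_gaps_alt numbers
instance (numbers : List Int) (out : Bool) : Decidable (Spec_check_for_gaps numbers out) := by unfold Spec_check_for_gaps; infer_instance

-- ===== CLAIM (what is proved, stated in full; the proofs are below) =====
def Claim_equal_check_for_gaps : Prop := ∀ (numbers : List Int), Dom_check_for_gaps numbers → Spec_check_for_gaps numbers (check_for_gaps numbers)

-- ===== LEMMAS AND PROOFS =====

-- the early-return loop is an 'any' over the index list
theorem gapLoopA_eq_any (L : List Int) (idxs : List Int) :
    gapLoopA L idxs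
      = idxs.any (fun i => decide (PySem.List.pyGetD L i 0 - PySem.List.pyGetD L (i - 1) 0 > 1)) := by
  induction idxs with
  | nil => rfl
  | cons i rest ih => by_cases h : PySem.List.pyGetD L i 0 - PySem.List.pyGetD L (i - 1) 0 > 1 <;>
      simp [gapLoopA, h, ih]

-- "no adjacent gap" in the sorted list
def NoGap (L : List Int) : Prop := ∀ (k : Nat) (h : k + 1 < L.length), L[k + 1]'h ≤ L[k]'(Nat.lt_of_succ_lt h) + 1

theorem loop_false_iff (L : List Int) :
    gapLoopA L (PySem.List.pyRange 1 (PySem.List.len L)) = false ↔ NoGap L := by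
  rw [gapLoopA_eq_any, List.any_eq_false]
  constructor
  · intro h k hk
    have h1 : ((k : Int) + 1) ∈ PySem.List.pyRange 1 (PySem.List.len L) := by
      rw [PySem.List.mem_pyRange_one]
      simp [PySem.List.len]; omega
    have h2 := h _ h1
    have e1 : ((k : Int) + 1) = ((k + 1 : Nat) : Int) := by omega
    rw [e1] at h2
    simp only [PySem.List.pyGetD_natCast] at h2
    rw [show ((k + 1 : Nat) : Int) - 1 = ((k : Nat) : Int) by push_cast; ring] at h2
    simp only [PySem.List.pyGetD_natCast] at h2
    rw [List.getD_eq_getElem _ _ hk, List.getD_eq_getElem _ _ (Nat.lt_of_succ_lt hk)] at h2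
    simp only [decide_eq_true_eq, not_lt] at h2 ⊢
    omega
  · intro hng i hi
    rw [PySem.List.mem_pyRange_one] at hi
    simp only [PySem.List.len] at hi
    obtain ⟨hi1, hi2⟩ := hi
    simp only [decide_eq_true_eq, not_lt]
    rw [PySem.List.pyGetD_of_nonneg _ _ (by omega), PySem.List.pyGetD_of_nonneg _ _ (by omega)]
    have e2 : (i - 1).toNat = i.toNat - 1 := by omega
    rw [e2]
    have hk : i.toNat - 1 + 1 < L.length := by omega
    have hgt := hng (i.toNat - 1) hk
    simp only [show i.toNat - 1 + 1 = i.toNat from by omega] at hgt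
    rw [List.getD_eq_getElem _ _ (by omega), List.getD_eq_getElem _ _ (by omega)]
    omega

theorem sorted_mono {L : List Int} (hs : L.Pairwise (· ≤ ·)) {p q : Nat}
    (hpq : p ≤ q) (hq : q < L.length) : L[p] ≤ L[q] := by
  rcases Nat.lt_or_ge p q with h | h
  · exact (List.pairwise_iff_getElem.mp hs) p q (Nat.lt_of_lt_of_le h (Nat.le_of_lt hq)) hq h
  · have : p = q := Nat.le_antisymm hpq h
    subst this; exact le_refl _

theorem mem_of_between {L : List Int} (hne : 0 < L.length)
    (hng : NoGap L) {x : Int}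
    (h1 : L[0]'hne ≤ x) (h2 : x ≤ L[L.length - 1]'(Nat.sub_lt hne Nat.one_pos)) : x ∈ L := by
  have hP : ∃ k : Nat, k < L.length ∧ x ≤ L.getD k 0 :=
    ⟨L.length - 1, Nat.sub_lt hne Nat.one_pos, by
      rw [List.getD_eq_getElem _ _ (Nat.sub_lt hne Nat.one_pos)]; exact h2⟩
  obtain ⟨hk0lt, hk0ge⟩ := Nat.find_spec hP
  rw [List.getD_eq_getElem _ _ hk0lt] at hk0ge
  rcases Nat.eq_zero_or_pos (Nat.find hP) with hz | hpos
  · have : x = L[0]'hne := by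
      have := hk0ge
      simp only [hz] at this
      omega
    rw [this]; exact List.getElem_mem _
  · have hmin := Nat.find_min hP (show Nat.find hP - 1 < Nat.find hP by omega)
    push Not at hmin
    have hlt : L.getD (Nat.find hP - 1) 0 < x := hmin (by omega)
    rw [List.getD_eq_getElem _ _ (by omega)] at hlt
    have hkk : Nat.find hP - 1 + 1 < L.length := by omega
    have hstep := hng (Nat.find hP - 1) hkk
    have he : Nat.find hP - 1 + 1 = Nat.find hP := by omega
    simp only [he] at hstep hkk
    have : x = L[Nat.find hP]'hk0lt := by omega
    rw [this]; exact List.getElem_mem _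

theorem nogap_iff_card {L : List Int} (hs : L.Pairwise (· ≤ ·)) (hne : 0 < L.length) :
    NoGap L ↔ L[L.length - 1]'(Nat.sub_lt hne Nat.one_pos) - L[0]'hne + 1 = (L.toFinset.card : Int) := by
  have hlast : L.length - 1 < L.length := Nat.sub_lt hne Nat.one_pos
  have hsub : L.toFinset ⊆ Finset.Icc (L[0]'hne) (L[L.length - 1]'hlast) := by
    intro x hx
    rw [List.mem_toFinset] at hx
    obtain ⟨j, hj, rfl⟩ := List.mem_iff_getElem.mp hx
    rw [Finset.mem_Icc]
    exact ⟨sorted_mono hs (Nat.zero_le j) hj, sorted_mono hs (by omega) hlast⟩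
  constructor
  · intro hng
    have hsup : Finset.Icc (L[0]'hne) (L[L.length - 1]'hlast) ⊆ L.toFinset := by
      intro x hx
      rw [Finset.mem_Icc] at hx
      exact List.mem_toFinset.mpr (mem_of_between hne hng hx.1 hx.2)
    rw [Finset.Subset.antisymm hsub hsup, Int.card_Icc,
        Int.toNat_of_nonneg (by have := sorted_mono hs (Nat.zero_le _) hlast; omega)]
    ring
  · intro hcard k hk
    by_contra hgap
    push Not at hgap
    have hxnot : (L[k]'(Nat.lt_of_succ_lt hk)) + 1 ∉ L.toFinset := by
      intro hmem
      rw [List.mem_toFinset] at hmem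
      obtain ⟨j, hj, hje⟩ := List.mem_iff_getElem.mp hmem
      rcases Nat.lt_or_ge k j with hlt | hle
      · have := sorted_mono hs (show k + 1 ≤ j from hlt) hj; omega
      · have := sorted_mono hs hle (Nat.lt_of_succ_lt hk); omega
    have hxin : (L[k]'(Nat.lt_of_succ_lt hk)) + 1 ∈ Finset.Icc (L[0]'hne) (L[L.length - 1]'hlast) := by
      rw [Finset.mem_Icc]
      have h1 := sorted_mono hs (Nat.zero_le k) (Nat.lt_of_succ_lt hk)
      have h2 := sorted_mono hs (show k + 1 ≤ L.length - 1 by omega) hlast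
      omega
    have hss : L.toFinset ⊂ Finset.Icc (L[0]'hne) (L[L.length - 1]'hlast) :=
      ⟨hsub, fun h => hxnot (h hxin)⟩
    have hclt := Finset.card_lt_card hss
    rw [Int.card_Icc] at hclt
    omega

theorem check_for_gaps_eq (numbers : List Int) :
    check_for_gaps numbers = check_for_gaps_alt numbers := by
  by_cases hnil : numbers = []
  · simp [check_for_gaps, check_for_gaps_alt, hnil]
  · have hLne : PySem.List.sorted numbers (fun x => x) ≠ [] := by
      rw [Ne, PySem.List.sorted_eq_nil_iff]; exact hnil
    set L := PySem.List.sorted numbers (fun x => x) with hLdef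
    have hlen : 0 < L.length := List.length_pos_iff.mpr hLne
    have hs : L.Pairwise (· ≤ ·) := PySem.List.sorted_pairwise numbers (fun x => x)
    set S := PySem.Set.ofList numbers with hSdef
    have hSmem : ∀ y, y ∈ S ↔ y ∈ numbers := fun y => PySem.Set.mem_ofList numbers y
    have hLmem : ∀ y, y ∈ L ↔ y ∈ numbers := fun y => (PySem.List.sorted_perm numbers (fun x => x) false).mem_iff
    have hSne : S ≠ [] := by
      obtain ⟨z, hz⟩ := List.exists_mem_of_ne_nil numbers hnil
      exact List.ne_nil_of_mem ((hSmem z).mpr hz)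
    have hlast : L.length - 1 < L.length := Nat.sub_lt hlen Nat.one_pos
    obtain ⟨mx, hmx⟩ : ∃ mx, PySem.List.max? S (fun x => x) = some mx := by
      cases h : PySem.List.max? S (fun x => x) with
      | none => exact absurd ((PySem.List.max?_eq_none_iff S _).mp h) hSne
      | some m => exact ⟨m, rfl⟩
    obtain ⟨mn, hmn⟩ : ∃ mn, PySem.List.min? S (fun x => x) = some mn := by
      cases h : PySem.List.min? S (fun x => x) with
      | none => exact absurd ((PySem.List.min?_eq_none_iff S _).mp h) hSne
      | some m => exact ⟨m, rfl⟩
    -- mx is the last element of L, mn the head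
    have hmxval : mx = L[L.length - 1]'hlast := by
      have h1 : mx ∈ L := (hLmem mx).mpr ((hSmem mx).mp (PySem.List.max?_mem hmx))
      obtain ⟨j, hj, hje⟩ := List.mem_iff_getElem.mp h1
      have h2 : mx ≤ L[L.length - 1]'hlast := by
        rw [← hje]; exact sorted_mono hs (by omega) hlast
      have h3 := PySem.List.max?_isMax hmx _ ((hSmem _).mpr ((hLmem _).mp (List.getElem_mem hlast)))
      omega
    have hmnval : mn = L[0]'hlen := by
      have h1 : mn ∈ L := (hLmem mn).mpr ((hSmem mn).mp (PySem.List.min?_mem hmn))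
      obtain ⟨j, hj, hje⟩ := List.mem_iff_getElem.mp h1
      have h2 : L[0]'hlen ≤ mn := by
        rw [← hje]; exact sorted_mono hs (Nat.zero_le j) hj
      have h3 := PySem.List.min?_isMin hmn _ ((hSmem _).mpr ((hLmem _).mp (List.getElem_mem hlen)))
      omega
    have hcard : PySem.Set.len S = (L.toFinset.card : Int) := by
      have hfs : L.toFinset = S.toFinset := by
        apply Finset.ext; intro a
        simp only [List.mem_toFinset, hLmem, hSmem]
      rw [hfs, List.toFinset_card_of_nodup (PySem.Set.nodup_ofList numbers)]
      rfl
    have hA : check_for_gaps numbers = gapLoopA L (PySem.List.pyRange 1 (PySem.List.len L)) := by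
      simp [check_for_gaps, hnil, hLdef]
    have hB : check_for_gaps_alt numbers = decide (mx - mn + 1 ≠ PySem.Set.len S) := by
      simp [check_for_gaps_alt, hnil, ← hSdef, hmx, hmn]
    rw [hA, hB, Bool.eq_iff_iff, decide_eq_true_iff]
    constructor
    · intro ht heq
      have : gapLoopA L (PySem.List.pyRange 1 (PySem.List.len L)) = false := by
        rw [loop_false_iff L, nogap_iff_card hs hlen]
        rw [hmxval, hmnval, hcard] at heq
        exact heq
      rw [this] at ht; exact Bool.false_ne_true ht
    · intro hne'
      by_contra hf
      have : gapLoopA L (PySem.List.pyRange 1 (PySem.List.len L)) = false := by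
        cases h : gapLoopA L (PySem.List.pyRange 1 (PySem.List.len L)) with
        | false => rfl
        | true => exact absurd h hf
      rw [loop_false_iff L, nogap_iff_card hs hlen] at this
      rw [hmxval, hmnval, hcard] at hne'
      exact hne' this

-- ===== VERDICT (by name: the statement is the Claim_ definition above) =====
theorem check_for_gaps_spec : Claim_equal_check_for_gaps := by
  intro numbers _
  exact check_for_gaps_eq numbers
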